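-- pv_equiv track=rewrite | github.com/ldct/cp | codeforces/141/A/A.py | ans_gcd
-- ===== SOURCE A (Python) =====
-- from math import factorial, gcd
--
-- def ans_gcd(N):
--     ret = 0
--     for a in range(1, N+1):
--         for b in range(1, N+1):
--             for c in range(1, N+1):
--                 if gcd(a, b) == 1 and gcd(b, c) == 1 and gcd(a, c) == 1:
--                     ret = max(ret, a*b*c)
--     return ret
-- ===== SOURCE B (Python) =====
-- def ans_gcd(N):
--     # closed form (CF235A-style): best pairwise-coprime triple <= N
--     if N <= 0:
--         return 0
--     if N <= 2:
--         return N
--     if N % 2 == 1: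
--         return N * (N - 1) * (N - 2)
--     if N % 3 != 0:
--         return N * (N - 1) * (N - 3)
--     return (N - 1) * (N - 2) * (N - 3)
-- ===== Notes on version B (the rewrite author's own statement) =====
-- stated objective: faster
-- what changed: Replaced the cubic brute-force scan over all triples by a constant-time closed-form case split on N's parity and divisibility (the classical argument that the optimum is one of the products of near-maximal pairwise-coprime values).
import Mathlib
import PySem

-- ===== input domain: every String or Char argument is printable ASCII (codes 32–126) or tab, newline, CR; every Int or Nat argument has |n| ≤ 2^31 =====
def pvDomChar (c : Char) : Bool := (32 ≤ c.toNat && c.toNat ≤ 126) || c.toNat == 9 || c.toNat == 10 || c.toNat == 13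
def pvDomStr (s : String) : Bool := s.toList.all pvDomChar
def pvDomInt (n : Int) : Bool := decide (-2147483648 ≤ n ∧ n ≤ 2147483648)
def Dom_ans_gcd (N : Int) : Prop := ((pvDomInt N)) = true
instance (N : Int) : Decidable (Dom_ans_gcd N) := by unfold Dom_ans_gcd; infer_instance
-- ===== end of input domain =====

-- B replaces A's cubic triple loop by a constant-time closed-form case split on N's parity and divisibility.

-- ===== PORT A =====
-- innermost loop body: `if gcd(a,b)==1 and gcd(b,c)==1 and gcd(a,c)==1: ret = max(ret, a*b*c)`
def ansLoop3 (a b ret c : Int) : Int :=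
  if Int.gcd a b = 1 ∧ Int.gcd b c = 1 ∧ Int.gcd a c = 1 then max ret (a*b*c) else ret

-- `for c in range(1, N+1): ...`
def ansLoop2 (N a ret b : Int) : Int :=
  (PySem.List.pyRange 1 (N+1) 1).foldl (ansLoop3 a b) ret

-- `for b in range(1, N+1): ...`
def ansLoop1 (N ret a : Int) : Int :=
  (PySem.List.pyRange 1 (N+1) 1).foldl (ansLoop2 N a) ret

def ans_gcd (N : Int) : Int :=
  (PySem.List.pyRange 1 (N+1) 1).foldl (ansLoop1 N) 0

-- ===== PORT B =====
def ans_gcd_alt (N : Int) : Int :=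
  if N ≤ 0 then 0
  else if N ≤ 2 then N
  else if N % 2 = 1 then N * (N-1) * (N-2)
  else if N % 3 ≠ 0 then N * (N-1) * (N-3)
  else (N-1) * (N-2) * (N-3)

-- ===== PRECONDITION & SPEC =====
def Spec_ans_gcd (N : Int) (out : Int) : Prop := out = ans_gcd_alt N
instance (N : Int) (out : Int) : Decidable (Spec_ans_gcd N out) := by unfold Spec_ans_gcd; infer_instance

-- ===== CLAIM (what is proved, stated in full; the proofs are below) =====
def Claim_equal_ans_gcd : Prop := ∀ (N : Int), Dom_ans_gcd N → Spec_ans_gcd N (ans_gcd N)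

-- ===== LEMMAS AND PROOFS =====

-- Bezout certificate gives gcd = 1
lemma gcd_eq_one_of_bezout (a b u v : Int) (h : u*a + v*b = 1) : Int.gcd a b = 1 :=
  Int.isCoprime_iff_gcd_eq_one.mp ⟨u, v, h⟩

lemma gcd_sub_one (n : Int) : Int.gcd n (n-1) = 1 :=
  gcd_eq_one_of_bezout _ _ 1 (-1) (by ring)

lemma gcd_sub_two_of_odd (n : Int) (h : n % 2 = 1) : Int.gcd n (n-2) = 1 := by
  obtain ⟨k, hk⟩ : ∃ k, n = 2*k+1 := ⟨(n-1)/2, by omega⟩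
  subst hk
  exact gcd_eq_one_of_bezout _ _ (1-k) k (by ring)

lemma gcd_sub_three_of_not3 (n : Int) (h : n % 3 ≠ 0) : Int.gcd n (n-3) = 1 := by
  rcases (by omega : n % 3 = 1 ∨ n % 3 = 2) with h1 | h2
  · obtain ⟨k, hk⟩ : ∃ k, n = 3*k+1 := ⟨(n-1)/3, by omega⟩
    subst hk
    exact gcd_eq_one_of_bezout _ _ (1-k) k (by ring)
  · obtain ⟨k, hk⟩ : ∃ k, n = 3*k+2 := ⟨(n-2)/3, by omega⟩
    subst hk
    exact gcd_eq_one_of_bezout _ _ k (-(k+1)) (by ring)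

-- a common divisor ≥ 2 kills coprimality
lemma gcd_ne_one_of_dvd (d a b : Int) (hd : 2 ≤ d) (h1 : d ∣ a) (h2 : d ∣ b) :
    Int.gcd a b ≠ 1 := by
  intro h
  obtain ⟨u, v, huv⟩ := Int.isCoprime_iff_gcd_eq_one.mpr h
  have hdvd : d ∣ 1 := by
    rw [← huv]
    exact dvd_add (Dvd.dvd.mul_left h1 u) (Dvd.dvd.mul_left h2 v)
  have := Int.le_of_dvd one_pos hdvd
  omega

-- product monotone in each factor (nonneg)
lemma prod3_le (a b c A B C : Int) (ha0 : 0 ≤ a) (hb0 : 0 ≤ b) (hc0 : 0 ≤ c)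
    (hB : 0 ≤ B) (ha : a ≤ A) (hb : b ≤ B) (hc : c ≤ C) :
    a*b*c ≤ A*B*C := by
  have hA0 : 0 ≤ A := le_trans ha0 ha
  have h1 : a*b*c ≤ A*b*c :=
    mul_le_mul_of_nonneg_right (mul_le_mul_of_nonneg_right ha hb0) hc0
  have h2 : A*b*c ≤ A*B*c :=
    mul_le_mul_of_nonneg_right (mul_le_mul_of_nonneg_left hb hA0) hc0
  have h3 : A*B*c ≤ A*B*C :=
    mul_le_mul_of_nonneg_left hc (mul_nonneg hA0 hB)
  linarith

lemma alt_ge_self (N : Int) (hN : 1 ≤ N) : N ≤ ans_gcd_alt N := by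
  unfold ans_gcd_alt
  split_ifs with h0 h2 hodd h3
  · omega
  · omega
  · nlinarith [mul_nonneg (by omega : (0:Int) ≤ N-1) (by omega : (0:Int) ≤ N-2), (by omega : (1:Int) ≤ (N-1)), (by omega : (1:Int) ≤ (N-2))]
  · have h1 : (1:Int) ≤ (N-1)*(N-3) := by
      nlinarith [(by omega : (1:Int) ≤ N-1), (by omega : (1:Int) ≤ N-3)]
    calc N = N*1 := by ring
      _ ≤ N*((N-1)*(N-3)) := mul_le_mul_of_nonneg_left h1 (by omega)
      _ = N*(N-1)*(N-3) := by ring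
  · have h1 : N ≤ (N-1)*(N-2) := by
      nlinarith [(by omega : (5:Int) ≤ N-1), (by omega : (4:Int) ≤ N-2), (by omega : (6:Int) ≤ N)]
    have h2 : (0:Int) ≤ (N-1)*(N-2) := by nlinarith [(by omega : (5:Int) ≤ N-1), (by omega : (4:Int) ≤ N-2)]
    calc N ≤ (N-1)*(N-2) := h1
      _ = (N-1)*(N-2)*1 := by ring
      _ ≤ (N-1)*(N-2)*(N-3) := mul_le_mul_of_nonneg_left (by omega) h2

lemma alt_nonneg (N : Int) : 0 ≤ ans_gcd_alt N := by
  rcases le_or_gt N 0 with h | h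
  · unfold ans_gcd_alt; rw [if_pos h]
  · linarith [alt_ge_self N (by omega)]

-- the core upper bound, for a ≥ b ≥ c
lemma sorted_bound (N a b c : Int) (hc1 : 1 ≤ c) (hcb : c ≤ b) (hba : b ≤ a)
    (haN : a ≤ N) (gab : Int.gcd a b = 1) (gbc : Int.gcd b c = 1)
    (gac : Int.gcd a c = 1) : a*b*c ≤ ans_gcd_alt N := by
  have hN1 : 1 ≤ N := by omega
  by_cases hab : a = b
  · have ha1 : a = 1 := by
      subst hab
      rw [Int.gcd_self] at gab
      omega
    have hb1 : b = 1 := by omega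
    have hc1' : c = 1 := by omega
    rw [ha1, hb1, hc1']
    simp only [mul_one]
    linarith [alt_ge_self N hN1]
  by_cases hbc : b = c
  · have hb1 : b = 1 := by
      subst hbc
      rw [Int.gcd_self] at gbc
      omega
    have hc1' : c = 1 := by omega
    have : a*b*c = a := by rw [hb1, hc1']; ring
    rw [this]
    linarith [alt_ge_self N hN1, haN]
  -- distinct: 1 ≤ c ≤ b-1, b ≤ a-1, a ≤ N, hence N ≥ 3
  have hcb' : c ≤ b - 1 := by omega
  have hba' : b ≤ a - 1 := by omega
  have hN3 : 3 ≤ N := by omega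
  have hbN : b ≤ N - 1 := by omega
  have hcN : c ≤ N - 2 := by omega
  have ha0 : (0:Int) ≤ a := by omega
  have hb0 : (0:Int) ≤ b := by omega
  have hc0 : (0:Int) ≤ c := by omega
  by_cases hodd : N % 2 = 1
  · -- N odd: bound N(N-1)(N-2)
    have halt : ans_gcd_alt N = N*(N-1)*(N-2) := by
      unfold ans_gcd_alt
      split_ifs <;> first | rfl | (exfalso; omega)
    rw [halt]
    exact prod3_le a b c N (N-1) (N-2) ha0 hb0 hc0 (by omega) haN hbN hcN
  · have heven : N % 2 = 0 := by omega
    have hN4 : 4 ≤ N := by omega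
    by_cases h3 : N % 3 = 0
    · -- N divisible by 6: bound (N-1)(N-2)(N-3)
      have hN6 : 6 ≤ N := by omega
      have halt : ans_gcd_alt N = (N-1)*(N-2)*(N-3) := by
        unfold ans_gcd_alt
        split_ifs <;> first | rfl | (exfalso; omega)
      rw [halt]
      by_cases haNeq : a = N
      · -- b, c coprime to N: odd and not multiples of 3
        subst haNeq
        have hbodd : b % 2 = 1 := by
          by_contra hb2
          exact gcd_ne_one_of_dvd 2 a b (by omega) (by omega) (by omega) gab
        have hcodd : c % 2 = 1 := by
          by_contra hc2
          exact gcd_ne_one_of_dvd 2 a c (by omega) (by omega) (by omega) gac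
        have hc3 : c % 3 ≠ 0 := by
          intro hc3
          exact gcd_ne_one_of_dvd 3 a c (by omega) (by omega) (by omega) gac
        have hc5 : c ≤ a - 5 := by omega
        have key : (a-1)*(a-2)*(a-3) - a*(a-1)*(a-5) = 6*(a-1) := by ring
        have h6 : (0:Int) ≤ 6*(a-1) := by omega
        have := prod3_le a b c a (a-1) (a-5) ha0 hb0 hc0 (by omega)
          le_rfl (by omega) hc5
        linarith
      · have haN' : a ≤ N - 1 := by omega
        exact prod3_le a b c (N-1) (N-2) (N-3) ha0 hb0 hc0 (by omega)
          haN' (by omega) (by omega)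
    · -- N even, not divisible by 3: bound N(N-1)(N-3)
      have halt : ans_gcd_alt N = N*(N-1)*(N-3) := by
        unfold ans_gcd_alt
        split_ifs <;> first | rfl | (exfalso; omega)
      rw [halt]
      by_cases haNeq : a = N
      · subst haNeq
        have hcodd : c % 2 = 1 := by
          by_contra hc2
          exact gcd_ne_one_of_dvd 2 a c (by omega) (by omega) (by omega) gac
        have hc3' : c ≤ a - 3 := by omega
        exact prod3_le a b c a (a-1) (a-3) ha0 hb0 hc0 (by omega)
          le_rfl (by omega) hc3'
      · have haN' : a ≤ N - 1 := by omega
        have h1 := prod3_le a b c (N-1) (N-2) (N-3) ha0 hb0 hc0 (by omega)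
          haN' (by omega) (by omega)
        have h2 : (0:Int) ≤ (N-1)*(N-3) := mul_nonneg (by omega) (by omega)
        nlinarith

-- unsorted version: WLOG over the six orderings
lemma prod_le_alt (N a b c : Int) (ha : 1 ≤ a ∧ a ≤ N) (hb : 1 ≤ b ∧ b ≤ N)
    (hc : 1 ≤ c ∧ c ≤ N) (gab : Int.gcd a b = 1) (gbc : Int.gcd b c = 1)
    (gac : Int.gcd a c = 1) : a*b*c ≤ ans_gcd_alt N := by
  have gba : Int.gcd b a = 1 := by rwa [Int.gcd_comm]
  have gcb : Int.gcd c b = 1 := by rwa [Int.gcd_comm]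
  have gca : Int.gcd c a = 1 := by rwa [Int.gcd_comm]
  rcases le_total a b with h1 | h1 <;> rcases le_total b c with h2 | h2 <;>
    rcases le_total a c with h3 | h3
  · calc a*b*c = c*b*a := by ring
      _ ≤ _ := sorted_bound N c b a ha.1 h1 h2 hc.2 gcb gba gca
  · calc a*b*c = c*b*a := by ring
      _ ≤ _ := sorted_bound N c b a ha.1 h1 h2 hc.2 gcb gba gca
  · calc a*b*c = b*c*a := by ring
      _ ≤ _ := sorted_bound N b c a ha.1 h3 (by omega) hb.2 gbc gca gba
  · calc a*b*c = b*a*c := by ring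
      _ ≤ _ := sorted_bound N b a c hc.1 h3 h1 hb.2 gba gac gbc
  · calc a*b*c = c*a*b := by ring
      _ ≤ _ := sorted_bound N c a b hb.1 (by omega) h3 hc.2 gca gab gcb
  · calc a*b*c = a*c*b := by ring
      _ ≤ _ := sorted_bound N a c b hb.1 h2 h3 ha.2 gac gcb gab
  · calc a*b*c = a*b*c := by ring
      _ ≤ _ := sorted_bound N a b c hc.1 h2 h1 ha.2 gab gbc gac
  · calc a*b*c = a*b*c := by ring
      _ ≤ _ := sorted_bound N a b c hc.1 h2 h1 ha.2 gab gbc gac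

-- generic foldl lemmas
lemma foldl_ge_init {g : Int → Int → Int} (hg : ∀ r x, r ≤ g r x) :
    ∀ (l : List Int) (r : Int), r ≤ List.foldl g r l := by
  intro l
  induction l with
  | nil => intro r; simp
  | cons x t ih => intro r; exact le_trans (hg r x) (ih (g r x))

lemma foldl_le_max {g : Int → Int → Int} {K : Int} :
    ∀ (l : List Int) (r : Int), (∀ r' x, x ∈ l → g r' x ≤ max r' K) →
      List.foldl g r l ≤ max r K := by
  intro l
  induction l with
  | nil => intro r _; exact le_max_left r K
  | cons x t ih =>
    intro r h
    have h1 : List.foldl g (g r x) t ≤ max (g r x) K :=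
      ih (g r x) (fun r' y hy => h r' y (List.mem_cons_of_mem _ hy))
    have h2 : g r x ≤ max r K := h r x (List.mem_cons_self)
    show List.foldl g (g r x) t ≤ max r K
    calc List.foldl g (g r x) t ≤ max (g r x) K := h1
      _ ≤ max (max r K) K := max_le_max_right K h2
      _ = max r K := by rw [max_assoc, max_self]

lemma foldl_ge_of_mem {g : Int → Int → Int} (hg : ∀ r x, r ≤ g r x) {x v : Int}
    (hv : ∀ r, v ≤ g r x) :
    ∀ (l : List Int), x ∈ l → ∀ r, v ≤ List.foldl g r l := by
  intro l
  induction l with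
  | nil => intro h; exact absurd h (List.not_mem_nil)
  | cons y t ih =>
    intro hmem r
    rcases List.mem_cons.mp hmem with h | h
    · subst h
      exact le_trans (hv r) (foldl_ge_init hg t (g r x))
    · exact ih h (g r y)

-- monotonicity of each loop level
lemma mono3 (a b : Int) : ∀ r c, r ≤ ansLoop3 a b r c := by
  intro r c
  unfold ansLoop3
  split
  · exact le_max_left _ _
  · exact le_refl r

lemma mono2 (N a : Int) : ∀ r b, r ≤ ansLoop2 N a r b := by
  intro r b
  exact foldl_ge_init (mono3 a b) _ r

lemma mono1 (N : Int) : ∀ r a, r ≤ ansLoop1 N r a := by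
  intro r a
  exact foldl_ge_init (mono2 N a) _ r

lemma mem_range_iff (N x : Int) : x ∈ PySem.List.pyRange 1 (N+1) 1 ↔ 1 ≤ x ∧ x ≤ N := by
  rw [PySem.List.mem_pyRange_one]
  omega

-- upper bound: every loop state stays ≤ ans_gcd_alt N (as max with it)
lemma ans_gcd_le (N : Int) : ans_gcd N ≤ ans_gcd_alt N := by
  have key : ans_gcd N ≤ max 0 (ans_gcd_alt N) := by
    unfold ans_gcd
    apply foldl_le_max
    intro r1 a hamem
    have ha := (mem_range_iff N a).mp hamem
    unfold ansLoop1
    apply foldl_le_max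
    intro r2 b hbmem
    have hb := (mem_range_iff N b).mp hbmem
    unfold ansLoop2
    apply foldl_le_max
    intro r3 c hcmem
    have hc := (mem_range_iff N c).mp hcmem
    unfold ansLoop3
    split
    · next hcond =>
      exact max_le_max_left r3 (prod_le_alt N a b c ha hb hc hcond.1 hcond.2.1 hcond.2.2)
    · exact le_max_left r3 _
  calc ans_gcd N ≤ max 0 (ans_gcd_alt N) := key
    _ = ans_gcd_alt N := max_eq_right (alt_nonneg N)

-- lower bound via a witness triple
lemma ans_gcd_ge_of_triple (N a b c : Int) (ha : 1 ≤ a ∧ a ≤ N) (hb : 1 ≤ b ∧ b ≤ N)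
    (hc : 1 ≤ c ∧ c ≤ N) (g : Int.gcd a b = 1 ∧ Int.gcd b c = 1 ∧ Int.gcd a c = 1) :
    a*b*c ≤ ans_gcd N := by
  unfold ans_gcd
  apply foldl_ge_of_mem (mono1 N) (x := a) _ _ ((mem_range_iff N a).mpr ha)
  intro r
  unfold ansLoop1
  apply foldl_ge_of_mem (mono2 N a) (x := b) _ _ ((mem_range_iff N b).mpr hb)
  intro r'
  unfold ansLoop2
  apply foldl_ge_of_mem (mono3 a b) (x := c) _ _ ((mem_range_iff N c).mpr hc)
  intro r''
  unfold ansLoop3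
  rw [if_pos g]
  exact le_max_right _ _

lemma ans_gcd_ge (N : Int) (hN : 1 ≤ N) : ans_gcd_alt N ≤ ans_gcd N := by
  rcases (by omega : N = 1 ∨ N = 2 ∨ 3 ≤ N) with h1 | h2 | h3
  · subst h1
    have := ans_gcd_ge_of_triple 1 1 1 1 ⟨le_rfl, le_rfl⟩ ⟨le_rfl, le_rfl⟩
      ⟨le_rfl, le_rfl⟩ (by decide)
    simpa [ans_gcd_alt] using this
  · subst h2
    have := ans_gcd_ge_of_triple 2 2 1 1 (by omega) (by omega) (by omega) (by decide)
    simpa [ans_gcd_alt] using this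
  · by_cases hodd : N % 2 = 1
    · have halt : ans_gcd_alt N = N*(N-1)*(N-2) := by
        unfold ans_gcd_alt
        split_ifs <;> first | rfl | (exfalso; omega)
      rw [halt]
      refine ans_gcd_ge_of_triple N N (N-1) (N-2) (by omega) (by omega) (by omega)
        ⟨gcd_sub_one N, ?_, gcd_sub_two_of_odd N hodd⟩
      have := gcd_sub_one (N-1)
      rwa [show N-1-1 = N-2 by ring] at this
    · have heven : N % 2 = 0 := by omega
      by_cases h3m : N % 3 = 0
      · have halt : ans_gcd_alt N = (N-1)*(N-2)*(N-3) := by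
          unfold ans_gcd_alt
          split_ifs <;> first | rfl | (exfalso; omega)
        rw [halt]
        have hN6 : 6 ≤ N := by omega
        refine ans_gcd_ge_of_triple N (N-1) (N-2) (N-3) (by omega) (by omega) (by omega)
          ⟨?_, ?_, ?_⟩
        · have := gcd_sub_one (N-1)
          rwa [show N-1-1 = N-2 by ring] at this
        · have := gcd_sub_one (N-2)
          rwa [show N-2-1 = N-3 by ring] at this
        · have := gcd_sub_two_of_odd (N-1) (by omega)
          rwa [show N-1-2 = N-3 by ring] at this
      · have halt : ans_gcd_alt N = N*(N-1)*(N-3) := by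
          unfold ans_gcd_alt
          split_ifs <;> first | rfl | (exfalso; omega)
        rw [halt]
        refine ans_gcd_ge_of_triple N N (N-1) (N-3) (by omega) (by omega) (by omega)
          ⟨gcd_sub_one N, ?_, gcd_sub_three_of_not3 N h3m⟩
        have := gcd_sub_two_of_odd (N-1) (by omega)
        rwa [show N-1-2 = N-3 by ring] at this

-- ===== VERDICT (by name: the statement is the Claim_ definition above) =====
theorem ans_gcd_spec : Claim_equal_ans_gcd := by
  intro N _
  unfold Spec_ans_gcd
  rcases le_or_gt N 0 with h | h
  · have hnil : PySem.List.pyRange 1 (N+1) 1 = [] :=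
      PySem.List.pyRange_one_eq_nil (by omega)
    unfold ans_gcd ans_gcd_alt
    rw [hnil, if_pos h]
    rfl
  · exact le_antisymm (ans_gcd_le N) (ans_gcd_ge N (by omega))
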